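-- pv_equiv track=rewrite | github.com/rashadwest/Sportstechwest | scripts/stw-news-weekly-selector.py | _canonical_url
-- ===== SOURCE A (Python) =====
-- def _canonical_url(u: str) -> str:
--     u = u.strip()
--     if not u:
--         return u
--     for token in ("?utm_", "&utm_", "?ref=", "&ref=", "?fbclid=", "&fbclid="):
--         idx = u.find(token)
--         if idx != -1:
--             u = u[:idx]
--     return u.rstrip("/")
-- ===== SOURCE B (Python) =====
-- def _canonical_url(u: str) -> str:
--     u = u.strip()
--     cut = len(u)
--     for i, c in enumerate(u):
--         if c in "?&" and u.startswith(("utm_", "ref=", "fbclid="), i + 1):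
--             cut = i
--             break
--     return u[:cut].rstrip("/")
-- ===== Notes on version B (the rewrite author's own statement) =====
-- stated objective: idiomatic
-- what changed: Replaces A's six sequential find-and-truncate passes by a single left-to-right scan that cuts at the leftmost position where a separator character followed by a tracking marker occurs (correct because one tracking token cannot start strictly inside another's match).
import Mathlib
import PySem

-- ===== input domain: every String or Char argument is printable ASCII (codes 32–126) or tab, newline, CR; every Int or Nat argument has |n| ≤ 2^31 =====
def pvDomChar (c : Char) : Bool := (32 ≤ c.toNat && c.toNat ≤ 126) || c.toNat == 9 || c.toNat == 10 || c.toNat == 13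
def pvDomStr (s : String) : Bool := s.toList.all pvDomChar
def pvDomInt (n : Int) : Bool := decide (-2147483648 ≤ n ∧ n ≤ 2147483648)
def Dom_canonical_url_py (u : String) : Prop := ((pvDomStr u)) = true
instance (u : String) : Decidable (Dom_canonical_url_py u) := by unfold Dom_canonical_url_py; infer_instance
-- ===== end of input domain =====

-- B replaces A's six sequential find-and-truncate passes by a single left-to-right scan
-- that cuts at the leftmost '?' or '&' followed by a tracking marker (same return value; objective: idiomatic).

-- ===== PORT A =====
-- exact port of Python's str.rstrip("/"): remove trailing '/' characters (PySem has no rstrip-with-chars)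
def pvRstripSlash (cs : List Char) : List Char :=
  (cs.reverse.dropWhile (fun c => c == '/')).reverse

-- the six literal tokens of A's loop
def pvTokensA : List (List Char) :=
  [['?','u','t','m','_'], ['&','u','t','m','_'],
   ['?','r','e','f','='], ['&','r','e','f','='],
   ['?','f','b','c','l','i','d','='], ['&','f','b','c','l','i','d','=']]

-- A's loop body: idx = u.find(token); if idx != -1: u = u[:idx]
def pvStepA (cur token : List Char) : List Char :=
  -- idx = cur.find(token); if idx != -1: cur = cur[:idx]
  if PySem.Chars.find cur token ≠ -1 then
    PySem.List.slice cur none (some (PySem.Chars.find cur token))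
  else cur

def canonical_url_py (u : String) : String :=
  let cs := PySem.Chars.strip u.toList
  if cs = [] then String.ofList cs
  else String.ofList (pvRstripSlash (pvTokensA.foldl pvStepA cs))

-- ===== PORT B =====
def pvMarkers : List (List Char) :=
  [['u','t','m','_'], ['r','e','f','='], ['f','b','c','l','i','d','=']]

-- B's loop: first index i with u[i] in "?&" and u.startswith(markers, i+1); len(u) if none
def pvCut : List Char → Nat
  | [] => 0
  | c :: rest =>
    if (c == '?' || c == '&') && pvMarkers.any (fun m => PySem.Chars.startswith rest m) then 0
    else pvCut rest + 1

def canonical_url_py_alt (u : String) : String :=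
  let cs := PySem.Chars.strip u.toList
  String.ofList (pvRstripSlash (cs.take (pvCut cs)))

-- ===== PRECONDITION & SPEC =====
def Spec_canonical_url_py (u : String) (out : String) : Prop := out = canonical_url_py_alt u
instance (u : String) (out : String) : Decidable (Spec_canonical_url_py u out) := by unfold Spec_canonical_url_py; infer_instance

-- ===== CLAIM (what is proved, stated in full; the proofs are below) =====
def Claim_equal_canonical_url_py : Prop := ∀ (u : String), Dom_canonical_url_py u → Spec_canonical_url_py u (canonical_url_py u)

-- ===== LEMMAS AND PROOFS =====

-- first index of l at which some token of ts starts (l.length if none)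
def pvCutT (ts : List (List Char)) : List Char → Nat
  | [] => 0
  | c :: rest => if ts.any (fun t => t.isPrefixOf (c :: rest)) then 0 else pvCutT ts rest + 1

-- a tracking token: starts with '?' or '&', no '?'/'&' in its body
def pvGood (t : List Char) : Prop :=
  ∃ c body, t = c :: body ∧ (c = '?' ∨ c = '&') ∧ ∀ b ∈ body, b ≠ '?' ∧ b ≠ '&'

lemma pvGood_tokensA : ∀ t ∈ pvTokensA, pvGood t := by
  intro t ht
  simp only [pvTokensA, List.mem_cons, List.not_mem_nil, or_false] at ht
  rcases ht with rfl|rfl|rfl|rfl|rfl|rfl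
  · exact ⟨'?', _, rfl, Or.inl rfl, by simp⟩
  · exact ⟨'&', _, rfl, Or.inr rfl, by simp⟩
  · exact ⟨'?', _, rfl, Or.inl rfl, by simp⟩
  · exact ⟨'&', _, rfl, Or.inr rfl, by simp⟩
  · exact ⟨'?', _, rfl, Or.inl rfl, by simp⟩
  · exact ⟨'&', _, rfl, Or.inr rfl, by simp⟩

lemma pvGood_ne_nil {t : List Char} (h : pvGood t) : t ≠ [] := by
  obtain ⟨c, body, rfl, -, -⟩ := h
  simp

lemma pvCutT_le (ts : List (List Char)) (l : List Char) : pvCutT ts l ≤ l.length := by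
  induction l with
  | nil => simp [pvCutT]
  | cons c rest ih =>
    simp only [pvCutT]
    split
    · simp
    · simpa using ih

lemma pvCutT_hit {ts : List (List Char)} {l : List Char} (h : pvCutT ts l < l.length) :
    ∃ t ∈ ts, t <+: l.drop (pvCutT ts l) := by
  induction l with
  | nil => simp [pvCutT] at h
  | cons c rest ih =>
    simp only [pvCutT] at h ⊢
    by_cases hc : (ts.any fun t => t.isPrefixOf (c :: rest)) = true
    · rw [if_pos hc]
      obtain ⟨t, ht, hp⟩ := List.any_eq_true.mp hc
      exact ⟨t, ht, by simpa using List.isPrefixOf_iff_prefix.mp hp⟩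
    · rw [if_neg hc] at h ⊢
      simp only [List.length_cons, Nat.add_lt_add_iff_right] at h
      obtain ⟨t, ht, hp⟩ := ih h
      exact ⟨t, ht, by simpa using hp⟩

lemma pvCutT_no_hit_lt {ts : List (List Char)} {l : List Char} {i : Nat}
    (hi : i < pvCutT ts l) {t : List Char} (ht : t ∈ ts) : ¬ t <+: l.drop i := by
  induction l generalizing i with
  | nil => simp [pvCutT] at hi
  | cons c rest ih =>
    simp only [pvCutT] at hi
    by_cases hc : (ts.any fun t => t.isPrefixOf (c :: rest)) = true
    · rw [if_pos hc] at hi; omega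
    · rw [if_neg hc] at hi
      match i with
      | 0 =>
        intro hp
        simp only [List.drop_zero] at hp
        exact hc (List.any_eq_true.mpr ⟨t, ht, List.isPrefixOf_iff_prefix.mpr hp⟩)
      | i + 1 =>
        intro hp
        exact ih (Nat.lt_of_succ_lt_succ hi) (by simpa using hp)

lemma pvCutT_le_of_hit {ts : List (List Char)} {l t : List Char} {i : Nat}
    (ht : t ∈ ts) (h : t <+: l.drop i) : pvCutT ts l ≤ i := by
  induction l generalizing i with
  | nil => simp [pvCutT]
  | cons c rest ih =>
    simp only [pvCutT]
    by_cases hc : (ts.any fun t => t.isPrefixOf (c :: rest)) = true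
    · rw [if_pos hc]; omega
    · rw [if_neg hc]
      match i with
      | 0 =>
        exfalso
        simp only [List.drop_zero] at h
        exact hc (List.any_eq_true.mpr ⟨t, ht, List.isPrefixOf_iff_prefix.mpr h⟩)
      | i + 1 =>
        exact Nat.succ_le_succ (ih (by simpa using h))

lemma pvCutT_cons_no_occ {t : List Char} {l : List Char} (ts : List (List Char))
    (h : ∀ i, ¬ t <+: l.drop i) : pvCutT (t :: ts) l = pvCutT ts l := by
  induction l with
  | nil => simp [pvCutT]
  | cons c rest ih =>
    have h0 : t.isPrefixOf (c :: rest) = false := by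
      rw [Bool.eq_false_iff]
      intro hp
      exact h 0 (by simpa using List.isPrefixOf_iff_prefix.mp hp)
    have hrec := ih (fun i hp => h (i + 1) (by simpa using hp))
    simp only [pvCutT, List.any_cons, h0, Bool.false_or, hrec]

lemma pvPrefix_take_of_le {t xs : List Char} {n : Nat} (h : t <+: xs) (hn : t.length ≤ n) :
    t <+: xs.take n := by
  obtain ⟨r, rfl⟩ := h
  refine ⟨r.take (n - t.length), ?_⟩
  rw [List.take_append]
  rw [List.take_of_length_le hn]


lemma pvHit_in_take {t l : List Char} {m i : Nat} (h : t <+: (l.take m).drop i) : t <+: l.drop i := by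
  have h1 : (l.take m).drop i <+: l.drop i := by
    rw [List.drop_take]
    exact List.take_prefix _ _
  exact h.trans h1


lemma pvLt_len_of_hit {t l : List Char} {i : Nat} (htn : t ≠ []) (h : t <+: l.drop i) :
    i < l.length := by
  have h1 := h.length_le
  simp only [List.length_drop] at h1
  have h2 : 0 < t.length := List.length_pos_iff.mpr htn
  by_contra hge
  omega


-- two tracking-token occurrences cannot overlap
lemma pvSep {t t' l : List Char} {i j : Nat} (hg : pvGood t) (hg' : pvGood t')
    (h : t <+: l.drop i) (h' : t' <+: l.drop j) (hij : i < j) : i + t.length ≤ j := by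
  by_contra hlt
  obtain ⟨d, rfl⟩ : ∃ d, j = i + d := ⟨j - i, by omega⟩
  obtain ⟨c, body, rfl, hcq, hbody⟩ := hg
  obtain ⟨c', body', rfl, hcq', hbody'⟩ := hg'
  have hd0 : 0 < d := by omega
  have hoff : d < (c :: body).length := by
    simp only [List.length_cons] at hlt ⊢
    omega
  have hjlen : i + d < l.length := pvLt_len_of_hit (by simp) h'
  have hdj : 0 < (l.drop (i + d)).length := by simp; omega
  -- l[i+d] is the head of t', hence '?' or '&'
  have hj0 : (l.drop (i + d))[0]'hdj = c' := by
    have := h'.getElem (i := 0) (by simp)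
    simpa using this.symm
  have hlj : l[i + d]'hjlen = c' := by
    have hx := List.getElem_drop (xs := l) (i := i + d) (j := 0) (h := hdj)
    simpa [hx] using hj0
  -- l[i+d] is also a body character of t
  have hdi : d < (l.drop i).length := by
    have := h.length_le
    simp only [List.length_drop, List.length_cons] at this ⊢
    omega
  have hdrop : (l.drop i)[d]'hdi = (c :: body)[d]'hoff := (h.getElem hoff).symm
  have hlj2 : l[i + d]'hjlen = (c :: body)[d]'hoff := by
    have hx := List.getElem_drop (xs := l) (i := i) (j := d) (h := hdi)
    rw [hx] at hdrop
    exact hdrop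
  have hbmem : (c :: body)[d]'hoff ∈ body := by
    obtain ⟨k, rfl⟩ := Nat.exists_eq_succ_of_ne_zero (by omega : d ≠ 0)
    simp only [List.getElem_cons_succ]
    exact List.getElem_mem _
  have hval := hbody _ hbmem
  rw [hlj] at hlj2
  rcases hcq' with rfl | rfl
  · exact hval.1 hlj2.symm
  · exact hval.2 hlj2.symm

lemma pvCutT_nil_tok (l : List Char) : pvCutT [] l = l.length := by
  induction l with
  | nil => rfl
  | cons c rest ih => simp [pvCutT, ih]

-- A's fold over any family of tracking tokens cuts at the leftmost occurrence
lemma pvFold (ts : List (List Char)) (hts : ∀ t ∈ ts, pvGood t) (l : List Char) :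
    ts.foldl pvStepA l = l.take (pvCutT ts l) := by
  induction ts generalizing l with
  | nil => simp [pvCutT_nil_tok]
  | cons t ts ih =>
    have hgt : pvGood t := hts t (by simp)
    have hts' : ∀ t' ∈ ts, pvGood t' := fun t' ht' => hts t' (by simp [ht'])
    rw [List.foldl_cons]
    by_cases hf : PySem.Chars.find l t = -1
    · have hnocc : ∀ i, ¬ t <+: l.drop i := by
        intro i hp
        have : PySem.Chars.isIn t l = true :=
          (PySem.Chars.exists_prefix_drop_iff_isIn t l).mp ⟨i, hp⟩
        rw [PySem.Chars.isIn_iff_infix] at this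
        exact (PySem.Chars.find_eq_neg_one_iff l t).mp hf this
      have hstep : pvStepA l t = l := by simp [pvStepA, hf]
      rw [hstep, ih hts' l, pvCutT_cons_no_occ ts hnocc]
    · have h0 : 0 ≤ PySem.Chars.find l t := by
        have := PySem.Chars.neg_one_le_find l t
        omega
      obtain ⟨hpref, hmin⟩ := PySem.Chars.find_spec (s := l) (sub := t) h0
      set kn := (PySem.Chars.find l t).toNat with hkn
      have htn : t ≠ [] := pvGood_ne_nil hgt
      have hknlen : kn < l.length := pvLt_len_of_hit htn hpref
      have hstep : pvStepA l t = l.take kn := by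
        unfold pvStepA
        rw [if_pos hf, PySem.List.slice_to l h0]
      set K := pvCutT (t :: ts) l with hK
      have hKkn : K ≤ kn := pvCutT_le_of_hit (by simp) hpref
      have hcutTake : pvCutT ts (l.take kn) = K := by
        have hge : K ≤ pvCutT ts (l.take kn) := by
          by_contra hlt
          have hlen : pvCutT ts (l.take kn) < (l.take kn).length := by
            simp only [List.length_take]
            omega
          obtain ⟨t'', ht'', hp⟩ := pvCutT_hit hlen
          exact pvCutT_no_hit_lt (by omega) (by simp [ht''] : t'' ∈ t :: ts)
            (pvHit_in_take hp)
        have hle : pvCutT ts (l.take kn) ≤ K := by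
          rcases Nat.lt_or_ge K kn with hKlt | hKge
          · -- the leftmost hit is by some token of ts, with room inside l.take kn
            obtain ⟨t'', ht'', hp⟩ := pvCutT_hit (show K < l.length by omega)
            have ht''ts : t'' ∈ ts := by
              rcases List.mem_cons.mp ht'' with rfl | h'
              · exact absurd hp (hmin K (by omega))
              · exact h'
            have hroom : K + t''.length ≤ kn :=
              pvSep (hts' t'' ht''ts) hgt hp hpref hKlt
            have hptake : t'' <+: (l.take kn).drop K := by
              rw [List.drop_take]
              exact pvPrefix_take_of_le hp (by omega)
            exact pvCutT_le_of_hit ht''ts hptake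
          · have := pvCutT_le ts (l.take kn)
            simp only [List.length_take] at this
            omega
        omega
      rw [hstep, ih hts' (l.take kn), hcutTake, List.take_take]
      congr 1
      omega

-- B's scan is pvCutT for the six tokens
lemma pvCut_eq (l : List Char) : pvCutT pvTokensA l = pvCut l := by
  induction l with
  | nil => simp [pvCutT, pvCut]
  | cons c rest ih =>
    have hcond : (pvTokensA.any (fun t => t.isPrefixOf (c :: rest)))
        = ((c == '?' || c == '&') && pvMarkers.any (fun m => PySem.Chars.startswith rest m)) := by
      simp only [pvTokensA, pvMarkers, List.any_cons, List.any_nil,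
        List.isPrefixOf, PySem.Chars.startswith, Bool.or_false]
      cases hq : c == '?' <;> cases ha : c == '&' <;>
        cases h1 : (['u','t','m','_'] : List Char).isPrefixOf rest <;>
        cases h2 : (['r','e','f','='] : List Char).isPrefixOf rest <;>
        cases h3 : (['f','b','c','l','i','d','='] : List Char).isPrefixOf rest <;>
        simp_all [Bool.beq_comm]
    simp only [pvCutT, pvCut, hcond, ih]

-- ===== VERDICT (by name: the statement is the Claim_ definition above) =====
theorem canonical_url_py_spec : Claim_equal_canonical_url_py := by
  intro u _
  unfold Spec_canonical_url_py canonical_url_py canonical_url_py_alt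
  by_cases h : PySem.Chars.strip u.toList = []
  · simp [h, pvCut, pvRstripSlash]
  · simp only [h, pvFold pvTokensA pvGood_tokensA, pvCut_eq]
    simp
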